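-- pv_equiv track=rewrite | github.com/WargaLab-Information-Systems/algoritma-pemrograman-1A-2025 | modul-6/250441100068-RevaTanjani-AsprakKakDestyaNurfaizaMuslim/Tugas2 .py | gabung_tuple
-- ===== SOURCE A (Python) =====
-- def gabung_tuple(t1, t2):
--     gabung = t1 + t2
--
--     a = []
--     for x in gabung:
--         if x not in a:
--             a.append(x)
--
--     hasil = []
--     while a:
--         maks = a[0]
--         for x in a:
--             if x > maks:
--                 maks = x
--         hasil.append(maks)
--
--         a.remove(maks)
--
--     return tuple(hasil)
-- ===== SOURCE B (Python) =====
-- def gabung_tuple(t1, t2):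
--     # One pass: insert each element into its place in a descending list,
--     # skipping it when it is already there (dedup and sort in the same pass).
--     hasil = []
--     for x in t1 + t2:
--         i = 0
--         while i < len(hasil) and hasil[i] > x:
--             i += 1
--         if i == len(hasil) or hasil[i] != x:
--             hasil.insert(i, x)
--     return tuple(hasil)
-- ===== Notes on version B (the rewrite author's own statement) =====
-- stated objective: alternative
-- what changed: Replaces A's two phases (dedup scan, then repeated max-scan-and-remove selection sort) by a single pass that order-inserts each element into a descending list, deduplicating during the insertion scan.
import Mathlib
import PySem

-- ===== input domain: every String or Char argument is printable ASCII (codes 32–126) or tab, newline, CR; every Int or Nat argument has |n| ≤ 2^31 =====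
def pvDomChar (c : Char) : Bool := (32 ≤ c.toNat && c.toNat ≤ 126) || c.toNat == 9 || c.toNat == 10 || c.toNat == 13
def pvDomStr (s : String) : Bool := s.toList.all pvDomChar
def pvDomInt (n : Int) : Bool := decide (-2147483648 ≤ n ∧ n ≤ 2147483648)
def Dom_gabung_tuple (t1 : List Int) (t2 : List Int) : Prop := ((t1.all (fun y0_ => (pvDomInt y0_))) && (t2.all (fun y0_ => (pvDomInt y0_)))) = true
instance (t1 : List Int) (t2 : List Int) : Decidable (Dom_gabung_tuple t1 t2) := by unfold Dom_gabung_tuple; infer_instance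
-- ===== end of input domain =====

-- B replaces A's dedup pass + selection-sort-by-repeated-max with a single ordered-insertion pass; same result, proved equal (alternative decomposition, no speed claim).

-- ===== PORT A =====
-- a = []; for x in gabung: if x not in a: a.append(x)
def dedupA (g : List Int) : List Int :=
  g.foldl (fun acc x => if x ∈ acc then acc else acc ++ [x]) []

-- maks = a[0]; for x in a: if x > maks: maks = x
def selMaxA (m : Int) (l : List Int) : Int :=
  l.foldl (fun m x => if x > m then x else m) m

-- the running max is the start value or a member (used for termination of selLoopA)
theorem selMaxA_mem (l : List Int) (m : Int) : selMaxA m l = m ∨ selMaxA m l ∈ l := by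
  induction l generalizing m with
  | nil => left; rfl
  | cons y ys ih =>
    have key : selMaxA m (y :: ys) = selMaxA (if y > m then y else m) ys := rfl
    rcases ih (if y > m then y else m) with h | h
    · by_cases hy : y > m
      · rw [if_pos hy] at h
        right; rw [key, if_pos hy, h]; exact List.mem_cons_self ..
      · rw [if_neg hy] at h
        left; rw [key, if_neg hy]; exact h
    · right; rw [key]; exact List.mem_cons_of_mem _ h

-- while a: … hasil.append(maks); a.remove(maks)   (a.remove = erase first occurrence)
def selLoopA : List Int → List Int
  | [] => []
  | x :: tl =>
    let maks := selMaxA x (x :: tl)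
    maks :: selLoopA ((x :: tl).erase maks)
  termination_by a => a.length
  decreasing_by
    have hm : maks ∈ x :: tl := by
      show selMaxA x (x :: tl) ∈ x :: tl
      rcases selMaxA_mem (x :: tl) x with h' | h'
      · rw [h']; exact List.mem_cons_self ..
      · exact h'
    rw [List.length_erase_of_mem hm, List.length_cons]
    omega

def gabung_tuple (t1 : List Int) (t2 : List Int) : List Int :=
  selLoopA (dedupA (t1 ++ t2))

-- ===== PORT B =====
-- scan the descending list: skip larger elements, drop x if already present, else insert
def insDesc (x : Int) : List Int → List Int
  | [] => [x]
  | y :: ys => if y > x then y :: insDesc x ys else if y = x then y :: ys else x :: y :: ys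

def gabung_tuple_alt (t1 : List Int) (t2 : List Int) : List Int :=
  (t1 ++ t2).foldl (fun hasil x => insDesc x hasil) []

-- ===== PRECONDITION & SPEC =====
def Spec_gabung_tuple (t1 : List Int) (t2 : List Int) (out : List Int) : Prop := out = gabung_tuple_alt t1 t2
instance (t1 : List Int) (t2 : List Int) (out : List Int) : Decidable (Spec_gabung_tuple t1 t2 out) := by unfold Spec_gabung_tuple; infer_instance

-- ===== CLAIM (what is proved, stated in full; the proofs are below) =====
def Claim_equal_gabung_tuple : Prop := ∀ (t1 : List Int) (t2 : List Int), Dom_gabung_tuple t1 t2 → Spec_gabung_tuple t1 t2 (gabung_tuple t1 t2)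

-- ===== LEMMAS AND PROOFS =====

-- selMaxA is an upper bound of the start value and of every element
theorem selMaxA_ge (l : List Int) (m : Int) :
    m ≤ selMaxA m l ∧ ∀ z ∈ l, z ≤ selMaxA m l := by
  induction l generalizing m with
  | nil => exact ⟨le_refl m, by simp⟩
  | cons y ys ih =>
    have key : selMaxA m (y :: ys) = selMaxA (if y > m then y else m) ys := rfl
    rcases ih (if y > m then y else m) with ⟨h1, h2⟩
    rw [key]
    constructor
    · by_cases hy : y > m
      · rw [if_pos hy] at h1 ⊢; omega
      · rw [if_neg hy] at h1 ⊢; exact h1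
    · intro z hz
      rcases List.mem_cons.1 hz with h' | h'
      · subst h'
        by_cases hy : z > m
        · rw [if_pos hy] at h1 ⊢; exact h1
        · rw [if_neg hy] at h1 ⊢; omega
      · exact h2 z h'

-- dedupA fold invariants
theorem dedupFold_mem (g : List Int) (acc : List Int) (z : Int) :
    z ∈ g.foldl (fun acc x => if x ∈ acc then acc else acc ++ [x]) acc ↔ z ∈ acc ∨ z ∈ g := by
  induction g generalizing acc with
  | nil => simp
  | cons y ys ih =>
    simp only [List.foldl]
    by_cases hy : y ∈ acc
    · rw [if_pos hy, ih]
      simp only [List.mem_cons]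
      constructor
      · rintro (h | h)
        · exact Or.inl h
        · exact Or.inr (Or.inr h)
      · rintro (h | h | h)
        · exact Or.inl h
        · exact Or.inl (h ▸ hy)
        · exact Or.inr h
    · rw [if_neg hy, ih]
      simp only [List.mem_append,  List.mem_cons]
      tauto

theorem dedupFold_nodup (g : List Int) (acc : List Int) (h : acc.Nodup) :
    (g.foldl (fun acc x => if x ∈ acc then acc else acc ++ [x]) acc).Nodup := by
  induction g generalizing acc with
  | nil => exact h
  | cons y ys ih =>
    simp only [List.foldl]
    by_cases hy : y ∈ acc
    · rw [if_pos hy]; exact ih _ h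
    · rw [if_neg hy]
      refine ih _ ?_
      simp [List.nodup_append, h]
      intro a ha he
      exact hy (he ▸ ha)

-- selLoopA produces a strictly descending list with the same members, given a nodup input
theorem selLoopA_spec_aux (n : Nat) : ∀ (a : List Int), a.length ≤ n → a.Nodup →
    (selLoopA a).Pairwise (· > ·) ∧ ∀ z, z ∈ selLoopA a ↔ z ∈ a := by
  induction n with
  | zero =>
    intro a ha _
    cases a with
    | nil => simp [selLoopA]
    | cons x tl => simp at ha
  | succ n ih =>
    intro a ha hnd
    cases a with
    | nil => simp [selLoopA]
    | cons x tl =>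
      have hm : selMaxA x (x :: tl) ∈ x :: tl := by
        rcases selMaxA_mem (x :: tl) x with h' | h'
        · rw [h']; exact List.mem_cons_self ..
        · exact h'
      have hub : ∀ z ∈ x :: tl, z ≤ selMaxA x (x :: tl) := (selMaxA_ge (x :: tl) x).2
      have hlen : ((x :: tl).erase (selMaxA x (x :: tl))).length ≤ n := by
        rw [List.length_erase_of_mem hm, List.length_cons]
        simp only [List.length_cons] at ha
        omega
      rcases ih _ hlen (hnd.erase _) with ⟨hp, hmem⟩
      have hmem_erase : ∀ z, z ∈ (x :: tl).erase (selMaxA x (x :: tl)) ↔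
          z ≠ selMaxA x (x :: tl) ∧ z ∈ x :: tl := fun z => hnd.mem_erase_iff
      have hunf : selLoopA (x :: tl) =
          selMaxA x (x :: tl) :: selLoopA ((x :: tl).erase (selMaxA x (x :: tl))) := by
        rw [selLoopA]
      rw [hunf]
      constructor
      · refine List.pairwise_cons.2 ⟨?_, hp⟩
        intro z hz
        rcases (hmem_erase z).1 ((hmem z).1 hz) with ⟨hne, hzin⟩
        have := hub z hzin
        omega
      · intro z
        simp only [List.mem_cons]
        rw [hmem z, hmem_erase z]
        constructor
        · rintro (h' | ⟨_, h'⟩)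
          · rcases List.mem_cons.1 (h' ▸ hm) with h'' | h''
            · exact Or.inl h''
            · exact Or.inr h''
          · exact List.mem_cons.1 h'
        · intro h'
          by_cases hz : z = selMaxA x (x :: tl)
          · exact Or.inl hz
          · exact Or.inr ⟨hz, List.mem_cons.2 h'⟩

-- insDesc invariants
theorem insDesc_mem (x z : Int) (l : List Int) : z ∈ insDesc x l ↔ z = x ∨ z ∈ l := by
  induction l with
  | nil => simp [insDesc]
  | cons y ys ih =>
    simp only [insDesc]
    split_ifs with h1 h2
    · simp only [List.mem_cons, ih]; try tauto
    · subst h2; simp only [List.mem_cons]; try tauto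
    · simp only [List.mem_cons]; try tauto

theorem insDesc_pairwise (x : Int) (l : List Int) (h : l.Pairwise (· > ·)) :
    (insDesc x l).Pairwise (· > ·) := by
  induction l with
  | nil => simp [insDesc]
  | cons y ys ih =>
    rcases List.pairwise_cons.1 h with ⟨hy, hys⟩
    simp only [insDesc]
    split_ifs with h1 h2
    · refine List.pairwise_cons.2 ⟨?_, ih hys⟩
      intro z hz
      rcases (insDesc_mem x z ys).1 hz with h' | h'
      · omega
      · exact hy z h'
    · exact h
    · refine List.pairwise_cons.2 ⟨?_, h⟩
      intro z hz
      rcases List.mem_cons.1 hz with h' | h'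
      · omega
      · have := hy z h'; omega

theorem foldB_spec (g : List Int) (acc : List Int) (h : acc.Pairwise (· > ·)) :
    (g.foldl (fun hasil x => insDesc x hasil) acc).Pairwise (· > ·) ∧
    ∀ z, z ∈ g.foldl (fun hasil x => insDesc x hasil) acc ↔ z ∈ acc ∨ z ∈ g := by
  induction g generalizing acc with
  | nil => exact ⟨h, by simp⟩
  | cons y ys ih =>
    simp only [List.foldl]
    rcases ih (insDesc y acc) (insDesc_pairwise y acc h) with ⟨hp, hmem⟩
    refine ⟨hp, fun z => ?_⟩
    rw [hmem z, insDesc_mem]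
    simp only [List.mem_cons]
    tauto

-- two strictly descending lists with the same members are equal
theorem desc_ext (l1 : List Int) : ∀ (l2 : List Int), l1.Pairwise (· > ·) → l2.Pairwise (· > ·) →
    (∀ z, z ∈ l1 ↔ z ∈ l2) → l1 = l2 := by
  induction l1 with
  | nil =>
    intro l2 _ _ h
    cases l2 with
    | nil => rfl
    | cons y ys => exact absurd ((h y).2 (by simp)) (by simp)
  | cons x xs ih =>
    intro l2 h1 h2 h
    cases l2 with
    | nil => exact absurd ((h x).1 (by simp)) (by simp)
    | cons y ys =>
      rcases List.pairwise_cons.1 h1 with ⟨hx, hxs⟩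
      rcases List.pairwise_cons.1 h2 with ⟨hy, hys⟩
      have hxy : x = y := by
        have hx2 : x ∈ y :: ys := (h x).1 (by simp)
        have hy1 : y ∈ x :: xs := (h y).2 (by simp)
        rcases List.mem_cons.1 hx2 with h' | h'
        · exact h'
        · rcases List.mem_cons.1 hy1 with h'' | h''
          · omega
          · have := hy x h'; have := hx y h''; omega
      subst hxy
      have htail : ∀ z, z ∈ xs ↔ z ∈ ys := by
        intro z
        constructor
        · intro hz
          have := hx z hz
          rcases List.mem_cons.1 ((h z).1 (List.mem_cons_of_mem _ hz)) with h' | h'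
          · omega
          · exact h'
        · intro hz
          have := hy z hz
          rcases List.mem_cons.1 ((h z).2 (List.mem_cons_of_mem _ hz)) with h' | h'
          · omega
          · exact h'
      rw [ih ys hxs hys htail]

-- ===== VERDICT (by name: the statement is the Claim_ definition above) =====
theorem gabung_tuple_spec : Claim_equal_gabung_tuple := by
  intro t1 t2 _
  unfold Spec_gabung_tuple gabung_tuple gabung_tuple_alt
  have hnd : (dedupA (t1 ++ t2)).Nodup := dedupFold_nodup _ _ List.nodup_nil
  rcases selLoopA_spec_aux (dedupA (t1 ++ t2)).length _ (le_refl _) hnd with ⟨hpA, hmA⟩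
  rcases foldB_spec (t1 ++ t2) [] List.Pairwise.nil with ⟨hpB, hmB⟩
  refine desc_ext _ _ hpA hpB (fun z => ?_)
  rw [hmA z, hmB z]
  unfold dedupA
  rw [dedupFold_mem]
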